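-- pv_equiv track=rewrite | github.com/abelponce03/Hex-IA-2025 | utils/check_conections.py | dfs
-- ===== SOURCE A (Python) =====
-- def dfs(positions, player_id, size):
--     """
--     Verifica si existe un camino conectando los bordes correspondientes al jugador
--
--     positions: conjunto de posiciones (tuplas) ocupadas por el jugador
--     player_id: id del jugador (1: rojo, 2: azul)
--     size: tamaño del tablero
--     """
--     if not positions:
--         return False
--
--     # Definir los bordes de inicio y fin según el jugador
--     if player_id == 1:  # Rojo: izquierda a derecha
--         start_border = [(i, 0) for i in range(size)]
--         end_border = [(i, size-1) for i in range(size)]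
--     else:  # Azul: arriba a abajo
--         start_border = [(0, j) for j in range(size)]
--         end_border = [(size-1, j) for j in range(size)]
--
--     # Filtrar posiciones en el borde de inicio
--     start_positions = [pos for pos in positions if pos in start_border]
--
--     if not start_positions:
--         return False
--
--     # Realizar DFS desde cada posición en el borde de inicio
--     visited = set()
--     for start in start_positions:
--         if dfs_visit_new(positions, start, visited, end_border):
--             return True
--
--     return False
--
-- def dfs_visit_new(positions, current, visited, end_border):
--     """
--     Visita recursivamente las posiciones adyacentes en el DFS
--     """
--     visited.add(current)
--
--     # Si llegamos al borde final, hemos encontrado una conexión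
--     if current in end_border:
--         return True
--
--     # Direcciones adyacentes
--     directions = [(0, -1), (0, 1), (-1, 0), (1, 0), (-1, 1), (1, -1)]
--
--     # Visitar vecinos
--     for dx, dy in directions:
--         neighbor = (current[0] + dx, current[1] + dy)
--         if neighbor in positions and neighbor not in visited:
--             if dfs_visit_new(positions, neighbor, visited, end_border):
--                 return True
--
--     return False
-- ===== SOURCE B (Python) =====
-- def dfs(positions, player_id, size):
--     # Round-based set saturation (iterative closure) instead of recursive DFS;
--     # border membership is tested arithmetically instead of against border lists.
--     if not positions:
--         return False
--     if player_id == 1: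
--         is_start = lambda c: c[1] == 0 and 0 <= c[0] < size
--         is_end = lambda c: c[1] == size - 1 and 0 <= c[0] < size
--     else:
--         is_start = lambda c: c[0] == 0 and 0 <= c[1] < size
--         is_end = lambda c: c[0] == size - 1 and 0 <= c[1] < size
--     pts = set(positions)
--     seen = {c for c in pts if is_start(c)}
--     if not seen:
--         return False
--     dirs = ((0, -1), (0, 1), (-1, 0), (1, 0), (-1, 1), (1, -1))
--     for _ in range(len(pts)):
--         seen |= {(x + dx, y + dy) for (x, y) in seen for (dx, dy) in dirs} & pts
--     return any(is_end(c) for c in seen)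
-- ===== Notes on version B (the rewrite author's own statement) =====
-- stated objective: faster
-- what changed: Replaces the recursive depth-first search with a shared mutable visited set by an iterative round-based set saturation (the set of occupied start-border cells is repeatedly enlarged with adjacent occupied cells until closure, then tested against the end border), and tests border membership arithmetically instead of building and scanning O(size) border lists.
import Mathlib
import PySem

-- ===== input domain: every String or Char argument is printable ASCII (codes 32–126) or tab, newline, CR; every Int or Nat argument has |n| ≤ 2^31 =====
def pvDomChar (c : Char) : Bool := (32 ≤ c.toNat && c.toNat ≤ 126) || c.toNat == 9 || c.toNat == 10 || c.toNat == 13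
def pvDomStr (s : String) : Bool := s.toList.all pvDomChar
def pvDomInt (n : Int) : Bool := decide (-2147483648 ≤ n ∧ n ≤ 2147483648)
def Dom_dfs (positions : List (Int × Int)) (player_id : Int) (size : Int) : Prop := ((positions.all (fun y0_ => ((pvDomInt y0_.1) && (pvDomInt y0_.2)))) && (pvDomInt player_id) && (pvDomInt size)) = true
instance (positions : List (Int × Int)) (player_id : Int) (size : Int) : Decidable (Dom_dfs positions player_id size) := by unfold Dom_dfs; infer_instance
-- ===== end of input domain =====

-- B replaces A's recursive DFS by an iterative set-saturation closure; return values agree everywhere (no argument is mutated).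

-- ===== PORT A =====

-- the six hex directions (shared literal of both programs)
def pvDirs : List (Int × Int) := [(0,-1),(0,1),(-1,0),(1,0),(-1,1),(1,-1)]

-- start_border / end_border lists, exactly the comprehensions of A (B builds sets of the same comprehensions)
def pvStartBorder (player_id size : Int) : List (Int × Int) :=
  if player_id = 1 then (PySem.List.pyRange 0 size 1).map (fun i => (i, (0:Int)))
  else (PySem.List.pyRange 0 size 1).map (fun j => ((0:Int), j))

def pvEndBorder (player_id size : Int) : List (Int × Int) :=
  if player_id = 1 then (PySem.List.pyRange 0 size 1).map (fun i => (i, size-1))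
  else (PySem.List.pyRange 0 size 1).map (fun j => (size-1, j))

-- dfs_visit_new: the Nat argument is a termination guard only; dfs calls it with fuel
-- positions.length + 1, which is proved sufficient (pvDfsVisit_false below never needs the 0 case).
mutual
def pvDfsVisit (positions endB : List (Int × Int)) :
    Nat → (Int × Int) → PySem.Set (Int × Int) → Bool × PySem.Set (Int × Int)
  | 0, _, visited => (false, visited)
  | fuel+1, current, visited =>
    let visited1 := PySem.Set.add visited current
    if endB.contains current then (true, visited1)
    else pvDfsLoop positions endB fuel current pvDirs visited1
  termination_by fuel _ _ => (fuel, 0)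

-- the 'for dx, dy in directions' loop with its early return
def pvDfsLoop (positions endB : List (Int × Int)) :
    Nat → (Int × Int) → List (Int × Int) → PySem.Set (Int × Int) → Bool × PySem.Set (Int × Int)
  | _, _, [], visited => (false, visited)
  | fuel, current, d :: ds, visited =>
    let neighbor := (current.1 + d.1, current.2 + d.2)
    if positions.contains neighbor && !(PySem.Set.contains visited neighbor) then
      let r := pvDfsVisit positions endB fuel neighbor visited
      if r.1 then r
      else pvDfsLoop positions endB fuel current ds r.2
    else pvDfsLoop positions endB fuel current ds visited
  termination_by fuel _ ds _ => (fuel, ds.length + 1)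
end

-- the 'for start in start_positions' loop with its early return and the shared visited set
def pvDfsStarts (positions endB : List (Int × Int)) :
    List (Int × Int) → PySem.Set (Int × Int) → Bool
  | [], _ => false
  | s :: ss, visited =>
    let r := pvDfsVisit positions endB (positions.length + 1) s visited
    if r.1 then true else pvDfsStarts positions endB ss r.2

def dfs (positions : List (Int × Int)) (player_id : Int) (size : Int) : Bool :=
  if positions.isEmpty then false
  else
    let start_border := pvStartBorder player_id size
    let end_border := pvEndBorder player_id size
    let start_positions := positions.filter (fun pos => start_border.contains pos)
    if start_positions.isEmpty then false
    else pvDfsStarts positions end_border start_positions PySem.Set.empty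

-- ===== PORT B =====

-- arithmetic border-membership tests (B's is_start / is_end lambdas)
def pvIsStart (player_id size : Int) (c : Int × Int) : Bool :=
  if player_id = 1 then decide (c.2 = 0 ∧ 0 ≤ c.1 ∧ c.1 < size)
  else decide (c.1 = 0 ∧ 0 ≤ c.2 ∧ c.2 < size)

def pvIsEnd (player_id size : Int) (c : Int × Int) : Bool :=
  if player_id = 1 then decide (c.2 = size - 1 ∧ 0 ≤ c.1 ∧ c.1 < size)
  else decide (c.1 = size - 1 ∧ 0 ≤ c.2 ∧ c.2 < size)

-- seen |= {(x+dx, y+dy) for (x,y) in seen for (dx,dy) in dirs} & pts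
def pvGrow (pts : PySem.Set (Int × Int)) (seen : PySem.Set (Int × Int)) : PySem.Set (Int × Int) :=
  seen.foldl (fun acc c =>
    pvDirs.foldl (fun acc d =>
      if PySem.Set.contains pts (c.1 + d.1, c.2 + d.2) then
        PySem.Set.add acc (c.1 + d.1, c.2 + d.2)
      else acc) acc) seen

-- the 'for _ in range(len(pts))' loop
def pvSaturate (pts : PySem.Set (Int × Int)) : Nat → PySem.Set (Int × Int) → PySem.Set (Int × Int)
  | 0, seen => seen
  | n+1, seen => pvSaturate pts n (pvGrow pts seen)

def dfs_alt (positions : List (Int × Int)) (player_id : Int) (size : Int) : Bool :=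
  if positions.isEmpty then false
  else
    let pts := PySem.Set.ofList positions
    let seen := pts.filter (pvIsStart player_id size)
    if seen.isEmpty then false
    else (pvSaturate pts pts.length seen).any (pvIsEnd player_id size)

-- ===== PRECONDITION & SPEC =====
def Spec_dfs (positions : List (Int × Int)) (player_id : Int) (size : Int) (out : Bool) : Prop := out = dfs_alt positions player_id size
instance (positions : List (Int × Int)) (player_id : Int) (size : Int) (out : Bool) : Decidable (Spec_dfs positions player_id size out) := by unfold Spec_dfs; infer_instance

-- ===== CLAIM (what is proved, stated in full; the proofs are below) =====
def Claim_equal_dfs : Prop := ∀ (positions : List (Int × Int)) (player_id : Int) (size : Int), Dom_dfs positions player_id size → Spec_dfs positions player_id size (dfs positions player_id size)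

-- ===== LEMMAS AND PROOFS =====

-- one hex step: b is occupied and adjacent to a
def pvAdj (positions : List (Int × Int)) (a b : Int × Int) : Prop :=
  b ∈ positions ∧ ∃ d ∈ pvDirs, b = (a.1 + d.1, a.2 + d.2)

def pvReach (positions : List (Int × Int)) : (Int × Int) → (Int × Int) → Prop :=
  Relation.ReflTransGen (pvAdj positions)

-- the common specification: an occupied start-border cell reaches an end-border cell
def pvConn (positions : List (Int × Int)) (player_id size : Int) : Prop :=
  ∃ s, s ∈ positions ∧ s ∈ pvStartBorder player_id size ∧
    ∃ e, e ∈ pvEndBorder player_id size ∧ pvReach positions s e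


-- end-free and closed into V
def pvEFC (positions endB : List (Int × Int)) (x : Int × Int) (V : List (Int × Int)) : Prop :=
  x ∉ endB ∧ ∀ b, pvAdj positions x b → b ∈ V

-- every member of V is end-free and closed into V
def pvGood (positions endB V : List (Int × Int)) : Prop :=
  ∀ x ∈ V, pvEFC positions endB x V

def pvClosed (positions V : List (Int × Int)) : Prop :=
  ∀ c ∈ V, ∀ b, pvAdj positions c b → b ∈ V

-- number of distinct occupied cells not yet in W
def pvRem (positions W : List (Int × Int)) : Nat :=
  (PySem.Set.ofList positions).countP (fun x => decide (x ∉ W))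

lemma pvEFC_mono {positions endB : List (Int × Int)} {x : Int × Int} {V W : List (Int × Int)}
    (h : V ⊆ W) (he : pvEFC positions endB x V) : pvEFC positions endB x W :=
  ⟨he.1, fun b hb => h (he.2 b hb)⟩

lemma subset_add (s : List (Int × Int)) (x : Int × Int) : s ⊆ PySem.Set.add s x := by
  intro y hy; rw [PySem.Set.mem_add]; exact Or.inl hy

lemma add_subset_add {s t : List (Int × Int)} (x : Int × Int) (h : s ⊆ t) :
    PySem.Set.add s x ⊆ PySem.Set.add t x := by
  intro y hy
  rw [PySem.Set.mem_add] at hy ⊢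
  exact hy.imp (fun h' => h h') id

lemma countP_lt_countP {α : Type} (l : List α) (p q : α → Bool)
    (hpq : ∀ a ∈ l, q a = true → p a = true)
    (a : α) (ha : a ∈ l) (hp : p a = true) (hq : q a = false) :
    l.countP q < l.countP p := by
  revert hpq ha
  induction l with
  | nil => intro _ ha; cases ha
  | cons b l ih =>
    intro hpq ha
    rw [List.countP_cons, List.countP_cons]
    rcases List.mem_cons.mp ha with h1 | h1
    · subst h1
      rw [hp, hq]
      have hle : l.countP q ≤ l.countP p :=
        List.countP_mono_left (fun a h' hqa => hpq a (List.mem_cons_of_mem _ h') hqa)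
      simp only [if_true, Bool.false_eq_true, if_false]
      omega
    · have hlt := ih (fun a h' => hpq a (List.mem_cons_of_mem _ h')) h1
      have hb : (if q b = true then 1 else 0) ≤ (if p b = true then 1 else 0) := by
        by_cases hqb : q b = true
        · simp [hqb, hpq b List.mem_cons_self hqb]
        · simp [hqb]
      omega

lemma pvRem_le (positions W : List (Int × Int)) : pvRem positions W ≤ positions.length := by
  unfold pvRem
  exact Nat.le_trans List.countP_le_length (PySem.Set.length_ofList_le positions)

lemma pvRem_anti {positions V W : List (Int × Int)} (h : V ⊆ W) :
    pvRem positions W ≤ pvRem positions V := by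
  unfold pvRem
  apply List.countP_mono_left
  intro a _ h'
  simp only [decide_eq_true_eq] at h' ⊢
  exact fun hav => h' (h hav)

lemma pvRem_lt {positions W : List (Int × Int)} {nb : Int × Int}
    (hnb : nb ∈ positions) (hW : nb ∉ W) :
    pvRem positions (PySem.Set.add W nb) < pvRem positions W := by
  unfold pvRem
  refine countP_lt_countP _ _ _ ?hpq nb ?ha ?hp ?hq
  case hpq =>
    intro a _ h'
    simp only [decide_eq_true_eq] at h' ⊢
    exact fun haW => h' (subset_add W nb haW)
  case ha => rw [PySem.Set.mem_ofList]; exact hnb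
  case hp => simp [hW]
  case hq => simp [PySem.Set.mem_add]

-- ---- A side: monotonicity ----

lemma pvLoop_mono (positions endB : List (Int × Int)) (fuel : Nat)
    (hvisit : ∀ c vis, vis ⊆ (pvDfsVisit positions endB fuel c vis).2) :
    ∀ (ds : List (Int × Int)) (c : Int × Int) (vis : PySem.Set (Int × Int)),
      vis ⊆ (pvDfsLoop positions endB fuel c ds vis).2 := by
  intro ds
  induction ds with
  | nil => intro c vis; simp only [pvDfsLoop]; exact List.Subset.refl _
  | cons d ds ih =>
    intro c vis
    simp only [pvDfsLoop]
    split
    · split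
      · exact hvisit _ _
      · exact (hvisit _ _).trans (ih _ _)
    · exact ih _ _

lemma pvVisit_mono (positions endB : List (Int × Int)) :
    ∀ (fuel : Nat) (c : Int × Int) (vis : PySem.Set (Int × Int)),
      vis ⊆ (pvDfsVisit positions endB fuel c vis).2 := by
  intro fuel
  induction fuel with
  | zero => intro c vis; simp only [pvDfsVisit]; exact List.Subset.refl _
  | succ n ih =>
    intro c vis
    simp only [pvDfsVisit]
    split
    · exact subset_add vis c
    · exact (subset_add vis c).trans (pvLoop_mono positions endB n ih _ _ _)

-- ---- A side: soundness (true ⇒ an end cell is reachable) ----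

lemma pvLoop_sound (positions endB : List (Int × Int)) (fuel : Nat)
    (hvisit : ∀ c vis, (pvDfsVisit positions endB fuel c vis).1 = true →
      ∃ e ∈ endB, pvReach positions c e) :
    ∀ (ds : List (Int × Int)), (∀ d ∈ ds, d ∈ pvDirs) →
      ∀ (c : Int × Int) (vis : PySem.Set (Int × Int)),
        (pvDfsLoop positions endB fuel c ds vis).1 = true →
        ∃ e ∈ endB, pvReach positions c e := by
  intro ds
  induction ds with
  | nil => intro _ c vis h; simp [pvDfsLoop] at h
  | cons d ds ih =>
    intro hds c vis h
    have hds' : ∀ d' ∈ ds, d' ∈ pvDirs := fun d' hd' => hds d' (List.mem_cons_of_mem _ hd')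
    simp only [pvDfsLoop] at h
    split at h
    · rename_i hcond
      rw [Bool.and_eq_true] at hcond
      have hnbP : (c.1 + d.1, c.2 + d.2) ∈ positions := List.mem_of_elem_eq_true hcond.1
      split at h
      · rename_i hr
        obtain ⟨e, he, hre⟩ := hvisit _ _ h
        exact ⟨e, he, Relation.ReflTransGen.head ⟨hnbP, d, hds d List.mem_cons_self, rfl⟩ hre⟩
      · exact ih hds' c _ h
    · exact ih hds' c vis h

lemma pvVisit_sound (positions endB : List (Int × Int)) :
    ∀ (fuel : Nat) (c : Int × Int) (vis : PySem.Set (Int × Int)),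
      (pvDfsVisit positions endB fuel c vis).1 = true →
      ∃ e ∈ endB, pvReach positions c e := by
  intro fuel
  induction fuel with
  | zero => intro c vis h; simp [pvDfsVisit] at h
  | succ n ih =>
    intro c vis h
    simp only [pvDfsVisit] at h
    split at h
    · rename_i hc
      exact ⟨c, List.mem_of_elem_eq_true hc, Relation.ReflTransGen.refl⟩
    · exact pvLoop_sound positions endB n ih pvDirs (fun d hd => hd) c _ h

-- ---- A side: a failed search leaves an end-free, adjacency-closed visited set ----

lemma pvLoop_false (positions endB : List (Int × Int)) (fuel : Nat)
    (hvisit : ∀ c vis, pvRem positions (PySem.Set.add vis c) < fuel →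
      (pvDfsVisit positions endB fuel c vis).1 = false →
      c ∈ (pvDfsVisit positions endB fuel c vis).2 ∧
      pvEFC positions endB c (pvDfsVisit positions endB fuel c vis).2 ∧
      ∀ x ∈ (pvDfsVisit positions endB fuel c vis).2,
        x ∈ vis ∨ pvEFC positions endB x (pvDfsVisit positions endB fuel c vis).2) :
    ∀ (ds : List (Int × Int)) (c : Int × Int) (vis : PySem.Set (Int × Int)),
      (∀ nb : Int × Int, nb ∈ positions → nb ∉ vis →
        pvRem positions (PySem.Set.add vis nb) < fuel) →
      (pvDfsLoop positions endB fuel c ds vis).1 = false →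
      (∀ d ∈ ds, (c.1 + d.1, c.2 + d.2) ∈ positions →
        (c.1 + d.1, c.2 + d.2) ∈ (pvDfsLoop positions endB fuel c ds vis).2) ∧
      ∀ x ∈ (pvDfsLoop positions endB fuel c ds vis).2,
        x ∈ vis ∨ pvEFC positions endB x (pvDfsLoop positions endB fuel c ds vis).2 := by
  intro ds
  induction ds with
  | nil =>
    intro c vis hfuel h
    simp only [pvDfsLoop]
    exact ⟨fun d hd => absurd hd List.not_mem_nil, fun x hx => Or.inl hx⟩
  | cons d ds ih =>
    intro c vis hfuel h
    simp only [pvDfsLoop] at h ⊢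
    by_cases hcond : (positions.contains (c.1 + d.1, c.2 + d.2) &&
        !(PySem.Set.contains vis (c.1 + d.1, c.2 + d.2))) = true
    · rw [if_pos hcond] at h ⊢
      rw [Bool.and_eq_true] at hcond
      have hnbP : (c.1 + d.1, c.2 + d.2) ∈ positions := List.mem_of_elem_eq_true hcond.1
      have hnbvis : (c.1 + d.1, c.2 + d.2) ∉ vis := by simpa using hcond.2
      by_cases hr : (pvDfsVisit positions endB fuel (c.1 + d.1, c.2 + d.2) vis).1 = true
      · rw [if_pos hr] at h
        rw [hr] at h
        exact Bool.noConfusion h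
      · rw [if_neg hr] at h ⊢
        rw [Bool.not_eq_true] at hr
        obtain ⟨hnbV, hEFCnb, hVr⟩ := hvisit (c.1 + d.1, c.2 + d.2) vis (hfuel _ hnbP hnbvis) hr
        have hvr2 : vis ⊆ (pvDfsVisit positions endB fuel (c.1 + d.1, c.2 + d.2) vis).2 :=
          pvVisit_mono positions endB fuel _ vis
        have hfuel' : ∀ nb', nb' ∈ positions →
            nb' ∉ (pvDfsVisit positions endB fuel (c.1 + d.1, c.2 + d.2) vis).2 →
            pvRem positions (PySem.Set.add (pvDfsVisit positions endB fuel (c.1 + d.1, c.2 + d.2) vis).2 nb') < fuel := by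
          intro nb' hn1 hn2
          have hn3 : nb' ∉ vis := fun hx => hn2 (hvr2 hx)
          exact lt_of_le_of_lt (pvRem_anti (add_subset_add nb' hvr2)) (hfuel nb' hn1 hn3)
        obtain ⟨hcov, hnew⟩ := ih c _ hfuel' h
        have hsub : (pvDfsVisit positions endB fuel (c.1 + d.1, c.2 + d.2) vis).2 ⊆
            (pvDfsLoop positions endB fuel c ds (pvDfsVisit positions endB fuel (c.1 + d.1, c.2 + d.2) vis).2).2 :=
          pvLoop_mono positions endB fuel (pvVisit_mono positions endB fuel) ds c _
        constructor
        · intro d' hd' hP'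
          rcases List.mem_cons.mp hd' with h1 | h1
          · subst h1; exact hsub hnbV
          · exact hcov d' h1 hP'
        · intro x hx
          rcases hnew x hx with hx1 | hx1
          · rcases hVr x hx1 with hx2 | hx2
            · exact Or.inl hx2
            · exact Or.inr (pvEFC_mono hsub hx2)
          · exact Or.inr hx1
    · rw [if_neg hcond] at h ⊢
      obtain ⟨hcov, hnew⟩ := ih c vis hfuel h
      have hsub : vis ⊆ (pvDfsLoop positions endB fuel c ds vis).2 :=
        pvLoop_mono positions endB fuel (pvVisit_mono positions endB fuel) ds c vis
      constructor
      · intro d' hd' hP'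
        rcases List.mem_cons.mp hd' with h1 | h1
        · subst h1
          have hmem : (c.1 + d'.1, c.2 + d'.2) ∈ vis := by
            by_contra hnv
            exact hcond (by simp [hP', hnv])
          exact hsub hmem
        · exact hcov d' h1 hP'
      · exact hnew

lemma pvVisit_false (positions endB : List (Int × Int)) :
    ∀ (fuel : Nat) (c : Int × Int) (vis : PySem.Set (Int × Int)),
      pvRem positions (PySem.Set.add vis c) < fuel →
      (pvDfsVisit positions endB fuel c vis).1 = false →
      c ∈ (pvDfsVisit positions endB fuel c vis).2 ∧
      pvEFC positions endB c (pvDfsVisit positions endB fuel c vis).2 ∧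
      ∀ x ∈ (pvDfsVisit positions endB fuel c vis).2,
        x ∈ vis ∨ pvEFC positions endB x (pvDfsVisit positions endB fuel c vis).2 := by
  intro fuel
  induction fuel with
  | zero =>
    intro c vis hf _
    exact absurd hf (Nat.not_lt_zero _)
  | succ n ih =>
    intro c vis hf h
    simp only [pvDfsVisit] at h ⊢
    by_cases hc : endB.contains c = true
    · rw [if_pos hc] at h; simp at h
    · rw [if_neg hc] at h ⊢
      have hcE : c ∉ endB := fun hm => hc (by simp [hm])
      have hfuel' : ∀ nb, nb ∈ positions → nb ∉ PySem.Set.add vis c →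
          pvRem positions (PySem.Set.add (PySem.Set.add vis c) nb) < n := by
        intro nb hn1 hn2
        have h1 := pvRem_lt (W := PySem.Set.add vis c) hn1 hn2
        omega
      obtain ⟨hcov, hnew⟩ := pvLoop_false positions endB n ih pvDirs c (PySem.Set.add vis c) hfuel' h
      have hsub : PySem.Set.add vis c ⊆ (pvDfsLoop positions endB n c pvDirs (PySem.Set.add vis c)).2 :=
        pvLoop_mono positions endB n (pvVisit_mono positions endB n) pvDirs c _
      have hcEFC : pvEFC positions endB c (pvDfsLoop positions endB n c pvDirs (PySem.Set.add vis c)).2 := by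
        refine ⟨hcE, ?_⟩
        intro b hb
        obtain ⟨hbP, d, hd, hbd⟩ := hb
        subst hbd
        exact hcov d hd hbP
      refine ⟨hsub (by rw [PySem.Set.mem_add]; exact Or.inr rfl), hcEFC, ?_⟩
      intro x hx
      rcases hnew x hx with hx1 | hx1
      · rw [PySem.Set.mem_add] at hx1
        rcases hx1 with hx2 | hx2
        · exact Or.inl hx2
        · subst hx2
          exact Or.inr hcEFC
      · exact Or.inr hx1

-- reachability cannot leave a closed set
lemma pvReach_mem_closed {positions V : List (Int × Int)}
    (hC : pvClosed positions V) {s e : Int × Int}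
    (hr : pvReach positions s e) (hs : s ∈ V) : e ∈ V := by
  induction hr with
  | refl => exact hs
  | tail _ h2 ih => exact hC _ ih _ h2

lemma pvGood_closed {positions endB V : List (Int × Int)}
    (hG : pvGood positions endB V) : pvClosed positions V :=
  fun c hc b hb => (hG c hc).2 b hb

lemma pvStarts_sound (positions endB : List (Int × Int)) :
    ∀ (ss : List (Int × Int)) (vis : PySem.Set (Int × Int)),
      pvDfsStarts positions endB ss vis = true →
      ∃ s ∈ ss, ∃ e ∈ endB, pvReach positions s e := by
  intro ss
  induction ss with
  | nil => intro vis h; simp [pvDfsStarts] at h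
  | cons s ss ih =>
    intro vis h
    simp only [pvDfsStarts] at h
    split at h
    · rename_i hr
      obtain ⟨e, he, hre⟩ := pvVisit_sound positions endB _ s vis hr
      exact ⟨s, List.mem_cons_self, e, he, hre⟩
    · obtain ⟨s', hs', e, he, hre⟩ := ih _ h
      exact ⟨s', List.mem_cons_of_mem _ hs', e, he, hre⟩

lemma pvStarts_false (positions endB : List (Int × Int)) :
    ∀ (ss : List (Int × Int)) (vis : PySem.Set (Int × Int)),
      pvGood positions endB vis →
      pvDfsStarts positions endB ss vis = false →
      ∀ s ∈ ss, ∀ e ∈ endB, ¬ pvReach positions s e := by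
  intro ss
  induction ss with
  | nil => intro vis _ _ s hs; cases hs
  | cons s ss ih =>
    intro vis hG h
    simp only [pvDfsStarts] at h
    by_cases hr : (pvDfsVisit positions endB (positions.length + 1) s vis).1 = true
    · rw [if_pos hr] at h; exact Bool.noConfusion h
    · rw [if_neg hr] at h
      rw [Bool.not_eq_true] at hr
      have hf : pvRem positions (PySem.Set.add vis s) < positions.length + 1 :=
        Nat.lt_succ_of_le (pvRem_le positions _)
      obtain ⟨hsV, hEFCs, hVr⟩ := pvVisit_false positions endB _ s vis hf hr
      have hmono := pvVisit_mono positions endB (positions.length + 1) s vis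
      have hG' : pvGood positions endB (pvDfsVisit positions endB (positions.length + 1) s vis).2 := by
        intro x hx
        rcases hVr x hx with h1 | h1
        · exact pvEFC_mono hmono (hG x h1)
        · exact h1
      intro s' hs' e he hre
      rcases List.mem_cons.mp hs' with h1 | h1
      · subst h1
        have heV := pvReach_mem_closed (pvGood_closed hG') hre hsV
        exact (hG' e heV).1 he
      · exact ih _ hG' h s' h1 e he hre

lemma dfs_iff (positions : List (Int × Int)) (player_id size : Int) :
    dfs positions player_id size = true ↔ pvConn positions player_id size := by
  simp only [dfs]
  by_cases hemp : positions.isEmpty = true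
  · rw [if_pos hemp]
    constructor
    · intro h; exact Bool.noConfusion h
    · rintro ⟨s, hs, -⟩
      rw [List.isEmpty_iff] at hemp; subst hemp; cases hs
  · rw [if_neg hemp]
    by_cases hsp : (positions.filter (fun pos => (pvStartBorder player_id size).contains pos)).isEmpty = true
    · rw [if_pos hsp]
      constructor
      · intro h; exact Bool.noConfusion h
      · rintro ⟨s, hsP, hsSB, -⟩
        rw [List.isEmpty_iff] at hsp
        have hmem : s ∈ positions.filter (fun pos => (pvStartBorder player_id size).contains pos) := by
          rw [List.mem_filter]; exact ⟨hsP, by simp [hsSB]⟩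
        rw [hsp] at hmem; cases hmem
    · rw [if_neg hsp]
      constructor
      · intro h
        obtain ⟨s, hs, e, he, hre⟩ := pvStarts_sound positions _ _ _ h
        rw [List.mem_filter] at hs
        exact ⟨s, hs.1, List.mem_of_elem_eq_true hs.2, e, he, hre⟩
      · intro hConn
        by_contra hfalse
        rw [Bool.not_eq_true] at hfalse
        obtain ⟨s, hsP, hsSB, e, he, hre⟩ := hConn
        have hGood : pvGood positions (pvEndBorder player_id size) PySem.Set.empty := by
          intro x hx; cases hx
        have hmem : s ∈ positions.filter (fun pos => (pvStartBorder player_id size).contains pos) := by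
          rw [List.mem_filter]; exact ⟨hsP, by simp [hsSB]⟩
        exact pvStarts_false positions _ _ _ hGood hfalse s hmem e he hre

-- ---- B side ----

lemma mem_dirs_fold (pts : PySem.Set (Int × Int)) (c : Int × Int) :
    ∀ (ds : List (Int × Int)) (acc : PySem.Set (Int × Int)) (x : Int × Int),
      (x ∈ ds.foldl (fun acc d =>
        if PySem.Set.contains pts (c.1 + d.1, c.2 + d.2) then
          PySem.Set.add acc (c.1 + d.1, c.2 + d.2)
        else acc) acc) ↔
      x ∈ acc ∨ (x ∈ pts ∧ ∃ d ∈ ds, x = (c.1 + d.1, c.2 + d.2)) := by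
  intro ds
  induction ds with
  | nil => intro acc x; simp
  | cons d ds ih =>
    intro acc x
    rw [List.foldl_cons, ih]
    by_cases hc : PySem.Set.contains pts (c.1 + d.1, c.2 + d.2) = true
    · have hpt : (c.1 + d.1, c.2 + d.2) ∈ pts := by simpa using hc
      rw [if_pos hc, PySem.Set.mem_add]
      constructor
      · rintro ((h1 | h1) | ⟨h2, d', hd', h3⟩)
        · exact Or.inl h1
        · exact Or.inr ⟨by rw [h1]; exact hpt, d, List.mem_cons_self, h1⟩
        · exact Or.inr ⟨h2, d', List.mem_cons_of_mem _ hd', h3⟩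
      · rintro (h1 | ⟨h2, d', hd', h3⟩)
        · exact Or.inl (Or.inl h1)
        · rcases List.mem_cons.mp hd' with h4 | h4
          · subst h4; exact Or.inl (Or.inr h3)
          · exact Or.inr ⟨h2, d', h4, h3⟩
    · have hpt : (c.1 + d.1, c.2 + d.2) ∉ pts := by simpa using hc
      rw [if_neg hc]
      constructor
      · rintro (h1 | ⟨h2, d', hd', h3⟩)
        · exact Or.inl h1
        · exact Or.inr ⟨h2, d', List.mem_cons_of_mem _ hd', h3⟩
      · rintro (h1 | ⟨h2, d', hd', h3⟩)
        · exact Or.inl h1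
        · rcases List.mem_cons.mp hd' with h4 | h4
          · subst h4; exact absurd (h3 ▸ h2) hpt
          · exact Or.inr ⟨h2, d', h4, h3⟩

lemma mem_pvGrow (pts seen : PySem.Set (Int × Int)) (x : Int × Int) :
    x ∈ pvGrow pts seen ↔
      x ∈ seen ∨ (x ∈ pts ∧ ∃ c ∈ seen, ∃ d ∈ pvDirs, x = (c.1 + d.1, c.2 + d.2)) := by
  have key : ∀ (cs : List (Int × Int)) (acc : PySem.Set (Int × Int)) (x : Int × Int),
      (x ∈ cs.foldl (fun acc c => pvDirs.foldl (fun acc d =>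
        if PySem.Set.contains pts (c.1 + d.1, c.2 + d.2) then
          PySem.Set.add acc (c.1 + d.1, c.2 + d.2)
        else acc) acc) acc) ↔
      x ∈ acc ∨ (x ∈ pts ∧ ∃ c ∈ cs, ∃ d ∈ pvDirs, x = (c.1 + d.1, c.2 + d.2)) := by
    intro cs
    induction cs with
    | nil => intro acc x; simp
    | cons c cs ih =>
      intro acc x
      rw [List.foldl_cons, ih, mem_dirs_fold]
      constructor
      · rintro ((h1 | ⟨h2, d, hd, h3⟩) | ⟨h2, c', hc', d, hd, h3⟩)
        · exact Or.inl h1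
        · exact Or.inr ⟨h2, c, List.mem_cons_self, d, hd, h3⟩
        · exact Or.inr ⟨h2, c', List.mem_cons_of_mem _ hc', d, hd, h3⟩
      · rintro (h1 | ⟨h2, c', hc', d, hd, h3⟩)
        · exact Or.inl (Or.inl h1)
        · rcases List.mem_cons.mp hc' with h4 | h4
          · subst h4; exact Or.inl (Or.inr ⟨h2, d, hd, h3⟩)
          · exact Or.inr ⟨h2, c', h4, d, hd, h3⟩
  unfold pvGrow
  exact key seen seen x

lemma foldl_extend {α β : Type} (g : List α → β → List α)
    (h : ∀ acc b, ∃ t, g acc b = acc ++ t) :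
    ∀ (l : List β) (acc : List α), ∃ t, l.foldl g acc = acc ++ t := by
  intro l
  induction l with
  | nil => intro acc; exact ⟨[], (List.append_nil _).symm⟩
  | cons b l ih =>
    intro acc
    rw [List.foldl_cons]
    obtain ⟨t1, ht1⟩ := h acc b
    obtain ⟨t2, ht2⟩ := ih (g acc b)
    exact ⟨t1 ++ t2, by rw [ht2, ht1, List.append_assoc]⟩

lemma pvGrow_extend (pts seen : PySem.Set (Int × Int)) :
    ∃ t, pvGrow pts seen = seen ++ t := by
  unfold pvGrow
  apply foldl_extend
  intro acc c
  apply foldl_extend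
  intro acc' d
  by_cases hc : PySem.Set.contains pts (c.1 + d.1, c.2 + d.2) = true
  · rw [if_pos hc, PySem.Set.add_eq_ite]
    split
    · exact ⟨[], (List.append_nil _).symm⟩
    · exact ⟨[(c.1 + d.1, c.2 + d.2)], rfl⟩
  · rw [if_neg hc]
    exact ⟨[], (List.append_nil _).symm⟩

lemma foldl_nodup {α β : Type} (g : List α → β → List α)
    (h : ∀ acc b, acc.Nodup → (g acc b).Nodup) :
    ∀ (l : List β) (acc : List α), acc.Nodup → (l.foldl g acc).Nodup := by
  intro l
  induction l with
  | nil => intro acc h0; exact h0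
  | cons b l ih => intro acc h0; exact ih _ (h _ _ h0)

lemma pvGrow_nodup (pts seen : PySem.Set (Int × Int)) (h : seen.Nodup) :
    (pvGrow pts seen).Nodup := by
  unfold pvGrow
  refine foldl_nodup _ ?_ seen seen h
  intro acc c hacc
  refine foldl_nodup _ ?_ pvDirs acc hacc
  intro acc' d hacc'
  split
  · exact PySem.Set.nodup_add _ _ hacc'
  · exact hacc' 

lemma pvGrow_subset_pts {pts seen : PySem.Set (Int × Int)} (h : seen ⊆ pts) :
    pvGrow pts seen ⊆ pts := by
  intro x hx
  rw [mem_pvGrow] at hx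
  rcases hx with h1 | h1
  · exact h h1
  · exact h1.1

lemma pvSaturate_fix (pts : PySem.Set (Int × Int)) :
    ∀ (n : Nat) (seen : PySem.Set (Int × Int)),
      pvGrow pts seen = seen → pvSaturate pts n seen = seen := by
  intro n
  induction n with
  | zero => intro seen _; rfl
  | succ n ih =>
    intro seen hfix
    simp only [pvSaturate]
    rw [hfix]
    exact ih seen hfix

lemma pvSaturate_mono (pts : PySem.Set (Int × Int)) :
    ∀ (n : Nat) (seen : PySem.Set (Int × Int)), seen ⊆ pvSaturate pts n seen := by
  intro n
  induction n with
  | zero => intro seen; exact List.Subset.refl _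
  | succ n ih =>
    intro seen
    simp only [pvSaturate]
    have h1 : seen ⊆ pvGrow pts seen := by
      intro x hx; rw [mem_pvGrow]; exact Or.inl hx
    exact h1.trans (ih _)

lemma pvSaturate_sound (positions : List (Int × Int)) (pts S0 : PySem.Set (Int × Int))
    (hmem : ∀ x : Int × Int, x ∈ pts ↔ x ∈ positions) :
    ∀ (n : Nat) (seen : PySem.Set (Int × Int)),
      (∀ x ∈ seen, ∃ s ∈ S0, pvReach positions s x) →
      ∀ x ∈ pvSaturate pts n seen, ∃ s ∈ S0, pvReach positions s x := by
  intro n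
  induction n with
  | zero => intro seen hbase x hx; exact hbase x hx
  | succ n ih =>
    intro seen hbase x hx
    simp only [pvSaturate] at hx
    refine ih _ ?_ x hx
    intro y hy
    rw [mem_pvGrow] at hy
    rcases hy with h1 | ⟨h1, c, hc, d, hd, h3⟩
    · exact hbase y h1
    · obtain ⟨s, hs, hrs⟩ := hbase c hc
      exact ⟨s, hs, Relation.ReflTransGen.tail hrs ⟨(hmem y).mp h1, d, hd, h3⟩⟩

lemma pvGrow_fix_closed {positions : List (Int × Int)} {pts seen : PySem.Set (Int × Int)}
    (hmem : ∀ x : Int × Int, x ∈ pts ↔ x ∈ positions)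
    (hfix : pvGrow pts seen = seen) : pvClosed positions seen := by
  intro c hc b hb
  obtain ⟨hbP, d, hd, hbd⟩ := hb
  rw [← hfix, mem_pvGrow]
  exact Or.inr ⟨(hmem b).mpr hbP, c, hc, d, hd, hbd⟩

lemma pvSaturate_closed (positions : List (Int × Int)) (pts : PySem.Set (Int × Int))
    (hmem : ∀ x : Int × Int, x ∈ pts ↔ x ∈ positions) :
    ∀ (n : Nat) (seen : PySem.Set (Int × Int)),
      seen.Nodup → seen ⊆ pts → pts.length ≤ seen.length + n →
      pvClosed positions (pvSaturate pts n seen) := by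
  intro n
  induction n with
  | zero =>
    intro seen hnd hsub hlen
    have hsp : seen.Subperm pts := List.subperm_of_subset hnd hsub
    have hperm : seen.Perm pts := hsp.perm_of_length_le (by simpa using hlen)
    intro c hc b hb
    obtain ⟨hbP, -⟩ := hb
    exact hperm.symm.subset ((hmem b).mpr hbP)
  | succ n ih =>
    intro seen hnd hsub hlen
    obtain ⟨t, ht⟩ := pvGrow_extend pts seen
    cases t with
    | nil =>
      rw [List.append_nil] at ht
      simp only [pvSaturate]
      rw [ht, pvSaturate_fix pts n seen ht]
      exact pvGrow_fix_closed hmem ht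
    | cons a t =>
      have hlen2 : seen.length + 1 ≤ (pvGrow pts seen).length := by
        rw [ht, List.length_append]
        simp
      simp only [pvSaturate]
      exact ih (pvGrow pts seen) (pvGrow_nodup pts seen hnd)
        (pvGrow_subset_pts hsub) (by omega)

lemma isStart_iff (player_id size : Int) (c : Int × Int) :
    pvIsStart player_id size c = true ↔ c ∈ pvStartBorder player_id size := by
  unfold pvIsStart pvStartBorder
  by_cases hp : player_id = 1
  · rw [if_pos hp, if_pos hp, decide_eq_true_eq, List.mem_map]
    constructor
    · rintro ⟨h2, h0, h1⟩
      exact ⟨c.1, PySem.List.mem_pyRange_one.mpr ⟨h0, h1⟩, Prod.ext_iff.mpr ⟨rfl, h2.symm⟩⟩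
    · rintro ⟨i, hi, heq⟩
      rw [← heq]
      exact ⟨rfl, (PySem.List.mem_pyRange_one.mp hi).1, (PySem.List.mem_pyRange_one.mp hi).2⟩
  · rw [if_neg hp, if_neg hp, decide_eq_true_eq, List.mem_map]
    constructor
    · rintro ⟨h2, h0, h1⟩
      exact ⟨c.2, PySem.List.mem_pyRange_one.mpr ⟨h0, h1⟩, Prod.ext_iff.mpr ⟨h2.symm, rfl⟩⟩
    · rintro ⟨i, hi, heq⟩
      rw [← heq]
      exact ⟨rfl, (PySem.List.mem_pyRange_one.mp hi).1, (PySem.List.mem_pyRange_one.mp hi).2⟩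

lemma isEnd_iff (player_id size : Int) (c : Int × Int) :
    pvIsEnd player_id size c = true ↔ c ∈ pvEndBorder player_id size := by
  unfold pvIsEnd pvEndBorder
  by_cases hp : player_id = 1
  · rw [if_pos hp, if_pos hp, decide_eq_true_eq, List.mem_map]
    constructor
    · rintro ⟨h2, h0, h1⟩
      exact ⟨c.1, PySem.List.mem_pyRange_one.mpr ⟨h0, h1⟩, Prod.ext_iff.mpr ⟨rfl, h2.symm⟩⟩
    · rintro ⟨i, hi, heq⟩
      rw [← heq]
      exact ⟨rfl, (PySem.List.mem_pyRange_one.mp hi).1, (PySem.List.mem_pyRange_one.mp hi).2⟩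
  · rw [if_neg hp, if_neg hp, decide_eq_true_eq, List.mem_map]
    constructor
    · rintro ⟨h2, h0, h1⟩
      exact ⟨c.2, PySem.List.mem_pyRange_one.mpr ⟨h0, h1⟩, Prod.ext_iff.mpr ⟨h2.symm, rfl⟩⟩
    · rintro ⟨i, hi, heq⟩
      rw [← heq]
      exact ⟨rfl, (PySem.List.mem_pyRange_one.mp hi).1, (PySem.List.mem_pyRange_one.mp hi).2⟩

lemma dfs_alt_iff (positions : List (Int × Int)) (player_id size : Int) :
    dfs_alt positions player_id size = true ↔ pvConn positions player_id size := by
  simp only [dfs_alt]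
  by_cases hemp : positions.isEmpty = true
  · rw [if_pos hemp]
    constructor
    · intro h; exact Bool.noConfusion h
    · rintro ⟨s, hs, -⟩
      rw [List.isEmpty_iff] at hemp; subst hemp; cases hs
  · rw [if_neg hemp]
    have hmem : ∀ x : Int × Int, x ∈ PySem.Set.ofList positions ↔ x ∈ positions :=
      fun x => PySem.Set.mem_ofList _ _
    by_cases hsp : ((PySem.Set.ofList positions).filter (pvIsStart player_id size)).isEmpty = true
    · rw [if_pos hsp]
      constructor
      · intro h; exact Bool.noConfusion h
      · rintro ⟨s, hsP, hsSB, -⟩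
        rw [List.isEmpty_iff] at hsp
        have hs0 : s ∈ (PySem.Set.ofList positions).filter (pvIsStart player_id size) :=
          List.mem_filter.mpr ⟨(hmem s).mpr hsP, (isStart_iff _ _ _).mpr hsSB⟩
        rw [hsp] at hs0; cases hs0
    · rw [if_neg hsp]
      constructor
      · intro h
        rw [List.any_eq_true] at h
        obtain ⟨e, heV, heE⟩ := h
        obtain ⟨s, hs0, hrs⟩ := pvSaturate_sound positions (PySem.Set.ofList positions) _ hmem
          (PySem.Set.ofList positions).length _
          (fun x hx => ⟨x, hx, Relation.ReflTransGen.refl⟩) e heV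
        have hs0' := List.mem_filter.mp hs0
        exact ⟨s, (hmem s).mp hs0'.1, (isStart_iff _ _ _).mp hs0'.2, e,
          (isEnd_iff _ _ _).mp heE, hrs⟩
      · rintro ⟨s, hsP, hsSB, e, he, hre⟩
        have hs0 : s ∈ (PySem.Set.ofList positions).filter (pvIsStart player_id size) :=
          List.mem_filter.mpr ⟨(hmem s).mpr hsP, (isStart_iff _ _ _).mpr hsSB⟩
        have hsV := pvSaturate_mono (PySem.Set.ofList positions)
          (PySem.Set.ofList positions).length _ hs0
        have hcl : pvClosed positions (pvSaturate (PySem.Set.ofList positions)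
            (PySem.Set.ofList positions).length
            ((PySem.Set.ofList positions).filter (pvIsStart player_id size))) :=
          pvSaturate_closed positions _ hmem _ _
            ((PySem.Set.nodup_ofList positions).filter _)
            (fun x hx => (List.mem_filter.mp hx).1)
            (Nat.le_add_left _ _)
        have heV := pvReach_mem_closed hcl hre hsV
        rw [List.any_eq_true]
        exact ⟨e, heV, (isEnd_iff _ _ _).mpr he⟩

-- ===== VERDICT (by name: the statement is the Claim_ definition above) =====
theorem dfs_spec : Claim_equal_dfs := by
  intro positions player_id size _
  unfold Spec_dfs
  have hA := dfs_iff positions player_id size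
  have hB := dfs_alt_iff positions player_id size
  cases hA' : dfs positions player_id size <;> cases hB' : dfs_alt positions player_id size <;>
    simp_all
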